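-- pv_equiv track=rewrite | github.com/Rain-Shi/OpenClaw-Bilibili_video_understanding | video-understanding-mvp/app/live/aggregator.py | _pick_focus_points
-- ===== SOURCE A (Python) =====
-- def _clean(text: str) -> str:
--     return ' '.join((text or '').split()).strip()
--
-- def _pick_focus_points(texts: list[str], limit: int = 3) -> list[str]:
--     points: list[str] = []
--     for text in texts:
--         text = _clean(text)
--         if not text:
--             continue
--         if text not in points:
--             points.append(text)
--         if len(points) >= limit:
--             break
--     return points
-- ===== SOURCE B (Python) =====
-- def _clean(text: str) -> str:
--     return ' '.join((text or '').split()).strip()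
--
-- def _pick_focus_points(texts: list[str], limit: int = 3) -> list[str]:
--     cleaned = [_clean(t) for t in texts]
--     unique = list(dict.fromkeys(c for c in cleaned if c))
--     return unique[:max(limit, 0)]
-- ===== Notes on version B (the rewrite author's own statement) =====
-- stated objective: simpler
-- what changed: The single-pass loop with an early break and a linear 'text not in points' membership scan is replaced by a clean-filter / ordered-dedup-via-dict / truncate pipeline, so deduplication is one dict build instead of a repeated list scan.
-- intended difference: For limit <= 0 with at least one text containing a non-whitespace character, A's append-then-check loop still returns one element (the first cleaned text) even though at most 0 were requested, while B returns the empty list, the intended value for a non-positive limit. — e.g. on _pick_focus_points(["hi"], 0): A returns ["hi"], B returns []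
import Mathlib
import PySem

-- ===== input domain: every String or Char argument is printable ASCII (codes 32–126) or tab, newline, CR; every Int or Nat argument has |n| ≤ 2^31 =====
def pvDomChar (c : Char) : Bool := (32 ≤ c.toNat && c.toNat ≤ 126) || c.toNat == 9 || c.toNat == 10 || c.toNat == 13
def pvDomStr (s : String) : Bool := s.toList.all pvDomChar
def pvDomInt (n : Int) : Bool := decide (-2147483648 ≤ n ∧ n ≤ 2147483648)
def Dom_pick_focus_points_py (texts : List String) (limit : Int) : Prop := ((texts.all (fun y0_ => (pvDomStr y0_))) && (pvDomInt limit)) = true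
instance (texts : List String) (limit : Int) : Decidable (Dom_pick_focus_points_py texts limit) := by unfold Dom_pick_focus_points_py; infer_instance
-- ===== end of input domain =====

-- B replaces A's early-exit loop with a linear membership scan by a clean → filter → ordered-dedup → truncate
-- pipeline (simpler); for limit ≤ 0 with a non-blank text A still returns one element while B returns the empty list (see D_).


-- ===== PORT A =====
-- _clean: ' '.join((text or '').split()).strip()  ('text or ""' is the identity on a str argument)
def cleanA (text : String) : String :=
  PySem.Str.strip (PySem.Str.join " " (PySem.Str.split₀ text))

-- the for-loop: clean, skip blanks, append if unseen, break once len(points) >= limit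
def pickLoopA (limit : Int) : List String → List String → List String
  | [], points => points
  | t :: rest, points =>
    let text := cleanA t
    if text = "" then pickLoopA limit rest points
    else
      let points' := if points.contains text then points else points ++ [text]
      if limit ≤ (points'.length : Int) then points' else pickLoopA limit rest points'

def pick_focus_points_py (texts : List String) (limit : Int) : List String :=
  pickLoopA limit texts []

-- ===== PORT B =====
def cleanB (text : String) : String :=
  PySem.Str.strip (PySem.Str.join " " (PySem.Str.split₀ text))

-- cleaned = [_clean(t) for t in texts]; unique = list(dict.fromkeys(c for c in cleaned if c)); unique[:max(limit, 0)]
def pick_focus_points_py_alt (texts : List String) (limit : Int) : List String :=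
  let cleaned := texts.map cleanB
  let unique := PySem.List.dedup (cleaned.filter (fun c => c ≠ ""))
  PySem.List.slice unique none (some (max limit 0))

-- ===== PRECONDITION & SPEC =====
-- For limit ≤ 0 with at least one text containing a non-whitespace character, A's append-then-check loop still
-- returns one element (the first cleaned text) even though at most 0 were requested, while B returns the empty
-- list, the intended value for a non-positive limit.
def D_pick_focus_points_py (texts : List String) (limit : Int) : Prop :=
  limit ≤ 0 ∧ ∃ t ∈ texts, ∃ c ∈ t.toList, PySem.Chars.isspace c = false
instance (texts : List String) (limit : Int) : Decidable (D_pick_focus_points_py texts limit) := by unfold D_pick_focus_points_py; infer_instance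

def Spec_pick_focus_points_py (texts : List String) (limit : Int) (out : List String) : Prop := ¬ D_pick_focus_points_py texts limit → out = pick_focus_points_py_alt texts limit
instance (texts : List String) (limit : Int) (out : List String) : Decidable (Spec_pick_focus_points_py texts limit out) := by unfold Spec_pick_focus_points_py; infer_instance

def pvDiffWitness_pick_focus_points_py : List String × Int := (["hi"], 0)
def pvDiffWitnessOut_pick_focus_points_py : (List String) × (List String) := (["hi"], [])

-- ===== CLAIM (what is proved, stated in full; the proofs are below) =====
def Claim_unchanged_pick_focus_points_py : Prop := ∀ (texts : List String) (limit : Int), Dom_pick_focus_points_py texts limit → Spec_pick_focus_points_py texts limit (pick_focus_points_py texts limit)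
def Claim_changed_pick_focus_points_py : Prop := Dom_pick_focus_points_py (pvDiffWitness_pick_focus_points_py.1) (pvDiffWitness_pick_focus_points_py.2) ∧ D_pick_focus_points_py (pvDiffWitness_pick_focus_points_py.1) (pvDiffWitness_pick_focus_points_py.2) ∧ pick_focus_points_py (pvDiffWitness_pick_focus_points_py.1) (pvDiffWitness_pick_focus_points_py.2) = pvDiffWitnessOut_pick_focus_points_py.1 ∧ pick_focus_points_py_alt (pvDiffWitness_pick_focus_points_py.1) (pvDiffWitness_pick_focus_points_py.2) = pvDiffWitnessOut_pick_focus_points_py.2 ∧ pvDiffWitnessOut_pick_focus_points_py.1 ≠ pvDiffWitnessOut_pick_focus_points_py.2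
def Claim_exact_pick_focus_points_py : Prop := ∀ (texts : List String) (limit : Int), Dom_pick_focus_points_py texts limit → D_pick_focus_points_py texts limit → pick_focus_points_py texts limit ≠ pick_focus_points_py_alt texts limit

-- ===== LEMMAS AND PROOFS =====

-- equation lemmas for the loop and for split₀.go
theorem pickLoopA_nil (limit : Int) (points : List String) : pickLoopA limit [] points = points := rfl

theorem pickLoopA_cons (limit : Int) (t : String) (rest points : List String) :
    pickLoopA limit (t :: rest) points =
      if cleanA t = "" then pickLoopA limit rest points
      else
        (if limit ≤ ((if points.contains (cleanA t) then points else points ++ [cleanA t]).length : Int)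
         then (if points.contains (cleanA t) then points else points ++ [cleanA t])
         else pickLoopA limit rest (if points.contains (cleanA t) then points else points ++ [cleanA t])) := rfl

theorem go_nil (cur : List Char) (acc : List (List Char)) :
    PySem.Chars.split₀.go [] cur acc =
      if cur.isEmpty then acc.reverse else (cur.reverse :: acc).reverse := rfl

theorem go_cons (c : Char) (rest cur : List Char) (acc : List (List Char)) :
    PySem.Chars.split₀.go (c :: rest) cur acc =
      if PySem.Chars.isspace c then
        (if cur.isEmpty then PySem.Chars.split₀.go rest [] acc
         else PySem.Chars.split₀.go rest [] (cur.reverse :: acc))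
      else PySem.Chars.split₀.go rest (c :: cur) acc := rfl

theorem split₀_def (cs : List Char) : PySem.Chars.split₀ cs = PySem.Chars.split₀.go cs [] [] := rfl

-- the step function shared by both analyses
def stepA (s : List String) (t : String) : List String :=
  if cleanA t = "" then s else PySem.Set.add s (cleanA t)

theorem prefix_foldl_stepA (l : List String) (s : List String) : s <+: l.foldl stepA s := by
  induction l generalizing s with
  | nil => exact List.prefix_rfl
  | cons t rest ih =>
    rw [List.foldl_cons]
    refine List.IsPrefix.trans ?_ (ih (stepA s t))
    unfold stepA PySem.Set.add
    split_ifs <;> simp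

-- A's loop, while points has not yet reached the limit, computes the length-limit prefix of the full fold
theorem pickLoopA_eq_take (limit : Int) (l : List String) :
    ∀ points : List String, (points.length : Int) < limit →
      pickLoopA limit l points = (l.foldl stepA points).take limit.toNat := by
  induction l with
  | nil =>
    intro points h
    rw [pickLoopA_nil, List.foldl_nil, List.take_of_length_le (by omega)]
  | cons t rest ih =>
    intro points h
    rw [pickLoopA_cons, List.foldl_cons]
    by_cases hc : cleanA t = ""
    · rw [if_pos hc]
      have hs : stepA points t = points := by simp [stepA, hc]
      rw [hs]
      exact ih points h
    · rw [if_neg hc]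
      have hstep : stepA points t = if points.contains (cleanA t) then points else points ++ [cleanA t] := by
        simp [stepA, hc, PySem.Set.add]
      rw [← hstep]
      have hlen1 : (stepA points t).length ≤ points.length + 1 := by
        rw [hstep]; split_ifs <;> simp
      by_cases hfull : limit ≤ ((stepA points t).length : Int)
      · rw [if_pos hfull]
        have hlen : (stepA points t).length = limit.toNat := by omega
        have hpre := prefix_foldl_stepA rest (stepA points t)
        rw [← hlen]
        exact (List.prefix_iff_eq_take.mp hpre)
      · rw [if_neg hfull]
        exact ih (stepA points t) (by omega)

-- folding stepA is folding Set.add over the cleaned-and-filtered list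
theorem foldl_stepA_eq (l : List String) : ∀ s : List String,
    l.foldl stepA s = ((l.map cleanA).filter (fun c => c ≠ "")).foldl PySem.Set.add s := by
  induction l with
  | nil => intro s; simp
  | cons t rest ih =>
    intro s
    by_cases hc : cleanA t = "" <;> simp [stepA, hc, ih]

-- ---- character-level facts about _clean ----

theorem go_all_space (cs : List Char) (h : ∀ c ∈ cs, PySem.Chars.isspace c = true) :
    PySem.Chars.split₀.go cs [] [] = [] := by
  induction cs with
  | nil => rfl
  | cons c rest ih =>
    rw [go_cons, if_pos (h c (by simp))]
    simp only [List.isEmpty_nil, if_pos]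
    exact ih (fun c hc => h c (by simp [hc]))

theorem cleanA_of_all_space (t : String) (h : ∀ c ∈ t.toList, PySem.Chars.isspace c = true) :
    cleanA t = "" := by
  have hs : PySem.Chars.split₀ t.toList = [] := by rw [split₀_def]; exact go_all_space _ h
  unfold cleanA PySem.Str.split₀
  rw [hs]
  rfl

theorem pickLoopA_all_blank (limit : Int) (l : List String) (h : ∀ t ∈ l, cleanA t = "") :
    ∀ points, pickLoopA limit l points = points := by
  induction l with
  | nil => intro points; rfl
  | cons t rest ih =>
    intro points
    rw [pickLoopA_cons, if_pos (h t (by simp))]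
    exact ih (fun t ht => h t (by simp [ht])) points

-- go never returns [] once a word has started or been emitted
theorem go_nonempty (cs : List Char) :
    ∀ (cur : List Char) (acc : List (List Char)), cur ≠ [] ∨ acc ≠ [] →
      PySem.Chars.split₀.go cs cur acc ≠ [] := by
  induction cs with
  | nil =>
    intro cur acc h
    rw [go_nil]
    by_cases hcur : cur = []
    · subst hcur
      simp only [List.isEmpty_nil, if_pos]
      rcases h with h | h
      · exact absurd rfl h
      · simpa using h
    · rw [if_neg (by simpa [List.isEmpty_iff] using hcur)]
      simp
  | cons c rest ih =>
    intro cur acc h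
    rw [go_cons]
    by_cases hc : PySem.Chars.isspace c = true
    · rw [if_pos hc]
      by_cases hcur : cur = []
      · subst hcur
        simp only [List.isEmpty_nil, if_pos]
        rcases h with h | h
        · exact absurd rfl h
        · exact ih [] acc (Or.inr h)
      · rw [if_neg (by simpa [List.isEmpty_iff] using hcur)]
        exact ih [] (cur.reverse :: acc) (Or.inr (by simp))
    · rw [if_neg hc]
      exact ih (c :: cur) acc (Or.inl (by simp))

-- a string with a non-space character splits into at least one word
theorem go_ne_nil_of_nonspace (cs : List Char) :
    (∃ c ∈ cs, PySem.Chars.isspace c = false) → PySem.Chars.split₀.go cs [] [] ≠ [] := by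
  induction cs with
  | nil => rintro ⟨c, hc, -⟩; simp at hc
  | cons a rest ih =>
    rintro ⟨c, hc, hns⟩
    rw [go_cons]
    by_cases ha : PySem.Chars.isspace a = true
    · rw [if_pos ha]
      simp only [List.isEmpty_nil, if_pos]
      refine ih ⟨c, ?_, hns⟩
      rcases List.mem_cons.mp hc with h | h
      · subst h; rw [ha] at hns; cases hns
      · exact h
    · rw [if_neg ha]
      exact go_nonempty rest [a] [] (Or.inl (by simp))

-- every word split₀ produces is nonempty and all-non-space
theorem go_words (cs : List Char) :
    ∀ (cur : List Char) (acc : List (List Char)),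
      (∀ c ∈ cur, PySem.Chars.isspace c = false) →
      (∀ w ∈ acc, w ≠ [] ∧ ∀ c ∈ w, PySem.Chars.isspace c = false) →
      ∀ w ∈ PySem.Chars.split₀.go cs cur acc, w ≠ [] ∧ ∀ c ∈ w, PySem.Chars.isspace c = false := by
  induction cs with
  | nil =>
    intro cur acc hcur hacc w hw
    rw [go_nil] at hw
    by_cases hcurE : cur = []
    · subst hcurE
      simp only [List.isEmpty_nil, if_pos, List.mem_reverse] at hw
      exact hacc w hw
    · rw [if_neg (by simpa [List.isEmpty_iff] using hcurE)] at hw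
      simp only [List.mem_reverse, List.mem_cons] at hw
      rcases hw with hw | hw
      · subst hw
        refine ⟨by simpa using hcurE, ?_⟩
        intro c hc'; exact hcur c (by simpa using hc')
      · exact hacc w hw
  | cons c rest ih =>
    intro cur acc hcur hacc w hw
    rw [go_cons] at hw
    by_cases hc : PySem.Chars.isspace c = true
    · rw [if_pos hc] at hw
      by_cases hcurE : cur = []
      · subst hcurE
        simp only [List.isEmpty_nil, if_pos] at hw
        exact ih [] acc (by simp) hacc w hw
      · rw [if_neg (by simpa [List.isEmpty_iff] using hcurE)] at hw
        refine ih [] (cur.reverse :: acc) (by simp) ?_ w hw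
        intro w' hw'
        rcases List.mem_cons.mp hw' with hw' | hw'
        · subst hw'
          refine ⟨by simpa using hcurE, ?_⟩
          intro c' hc'; exact hcur c' (by simpa using hc')
        · exact hacc w' hw'
    · rw [if_neg hc] at hw
      refine ih (c :: cur) acc ?_ hacc w hw
      intro c' hc'
      rcases List.mem_cons.mp hc' with h | h
      · subst h; simpa using hc
      · exact hcur c' h

theorem strip_ne_nil (r : List Char) (c : Char)
    (hns : PySem.Chars.isspace c = false) (suff : List Char) :
    PySem.Chars.strip ((c :: r) ++ suff) ≠ [] := by
  unfold PySem.Chars.strip PySem.Chars.lstrip PySem.Chars.rstrip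
  rw [List.cons_append, List.dropWhile_cons_of_neg (by simp [hns])]
  intro hcon
  have h1 : (List.dropWhile PySem.Chars.isspace (c :: (r ++ suff)).reverse) = [] := by
    simpa using hcon
  have h2 := (List.dropWhile_eq_nil_iff).mp h1
  have := h2 c (by simp)
  simp [hns] at this

theorem cleanA_ne_of_nonspace (t : String) (c : Char) (hc : c ∈ t.toList)
    (hns : PySem.Chars.isspace c = false) : cleanA t ≠ "" := by
  have hsplit : PySem.Chars.split₀ t.toList ≠ [] := by
    rw [split₀_def]; exact go_ne_nil_of_nonspace _ ⟨c, hc, hns⟩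
  obtain ⟨w, ws, hws⟩ := List.exists_cons_of_ne_nil hsplit
  have hword : w ≠ [] ∧ ∀ c ∈ w, PySem.Chars.isspace c = false := by
    refine go_words t.toList [] [] (by simp) (by simp) w ?_
    rw [← split₀_def, hws]; simp
  obtain ⟨c₀, r₀, hw0⟩ := List.exists_cons_of_ne_nil hword.1
  have hns0 : PySem.Chars.isspace c₀ = false := hword.2 c₀ (by simp [hw0])
  intro hcon
  have htl : (cleanA t).toList = [] := by rw [hcon]; rfl
  unfold cleanA at htl
  rw [PySem.Str.strip, PySem.Str.join, PySem.Str.split₀] at htl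
  simp only [String.toList_ofList] at htl
  rw [hws] at htl
  simp only [List.map_map, Function.comp_def, String.toList_ofList, List.map_id',
    List.map_cons] at htl
  -- htl : PySem.Chars.strip (PySem.Chars.join " ".toList (w :: ws)) = []
  subst hw0
  cases hwsm : ws with
  | nil =>
    rw [hwsm, PySem.Chars.join_singleton] at htl
    exact strip_ne_nil r₀ c₀ hns0 [] (by simpa using htl)
  | cons x xs =>
    rw [hwsm, PySem.Chars.join_cons_cons, List.append_assoc] at htl
    exact strip_ne_nil r₀ c₀ hns0 _ htl

theorem pickLoopA_ne_nil (limit : Int) (hlim : limit ≤ 0) (l : List String)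
    (h : ∃ t ∈ l, cleanA t ≠ "") : pickLoopA limit l [] ≠ [] := by
  induction l with
  | nil => rcases h with ⟨t, ht, -⟩; simp at ht
  | cons t rest ih =>
    by_cases hc : cleanA t = ""
    · rw [pickLoopA_cons, if_pos hc]
      refine ih ?_
      rcases h with ⟨t', ht', hne⟩
      rcases List.mem_cons.mp ht' with h | h
      · subst h; exact absurd hc hne
      · exact ⟨t', h, hne⟩
    · rw [pickLoopA_cons, if_neg hc]
      have h1 : (if ([] : List String).contains (cleanA t) then ([] : List String) else [] ++ [cleanA t]) = [cleanA t] := rfl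
      rw [h1, if_pos (show limit ≤ (([cleanA t].length : Nat) : Int) by simp; omega)]
      simp

-- B unfolded: the take form
theorem alt_eq_take (texts : List String) (limit : Int) :
    pick_focus_points_py_alt texts limit =
      (((texts.map cleanA).filter (fun c => c ≠ "")).foldl PySem.Set.add []).take (max limit 0).toNat := by
  show PySem.List.slice (PySem.List.dedup ((texts.map cleanA).filter (fun c => c ≠ ""))) none (some (max limit 0)) = _
  have h := PySem.List.slice_to (xs := PySem.List.dedup ((texts.map cleanA).filter (fun c => c ≠ "")))
    (b := max limit 0) (by omega)
  rw [h, PySem.List.dedup, PySem.Set.ofList_eq_foldl]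

-- ===== VERDICT (by name: the statement is the Claim_ definition above) =====
theorem pick_focus_points_py_spec : Claim_unchanged_pick_focus_points_py := by
  intro texts limit _ hnd
  rw [alt_eq_take]
  by_cases hlim : 0 < limit
  · have hmax : max limit 0 = limit := by omega
    rw [hmax]
    show pickLoopA limit texts [] = _
    rw [pickLoopA_eq_take limit texts [] (by simpa using hlim), foldl_stepA_eq]
  · -- limit ≤ 0 and, by ¬D_, every text is all-whitespace
    have hall : ∀ t ∈ texts, ∀ c ∈ t.toList, PySem.Chars.isspace c = true := by
      intro t ht c hc
      by_contra hcon
      exact hnd ⟨by omega, t, ht, c, hc, by simpa using hcon⟩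
    have hmax : (max limit 0).toNat = 0 := by omega
    rw [hmax, List.take_zero]
    show pickLoopA limit texts [] = []
    rw [pickLoopA_all_blank limit texts (fun t ht => cleanA_of_all_space t (hall t ht))]

set_option maxRecDepth 4000 in
theorem pick_focus_points_py_changed : Claim_changed_pick_focus_points_py := by
  unfold Claim_changed_pick_focus_points_py
  refine ⟨by decide, ?_, by decide, by decide, by decide⟩
  show D_pick_focus_points_py ["hi"] 0
  unfold D_pick_focus_points_py
  refine ⟨by norm_num, "hi", by simp, 'h', ?_, by decide⟩
  rw [show "hi".toList = ['h','i'] from by decide]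
  simp

theorem pick_focus_points_py_tight : Claim_exact_pick_focus_points_py := by
  intro texts limit _ hd heq
  rcases hd with ⟨hlim, t, ht, c, hc, hns⟩
  have hB : pick_focus_points_py_alt texts limit = [] := by
    rw [alt_eq_take]
    have h0 : (max limit 0).toNat = 0 := by omega
    rw [h0, List.take_zero]
  rw [hB] at heq
  exact pickLoopA_ne_nil limit hlim texts ⟨t, ht, cleanA_ne_of_nonspace t c hc hns⟩ heq
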